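-- pv_equiv track=rewrite | github.com/yuvalsaias/My-Chart | server.py | detect_time_signature
-- ===== SOURCE A (Python) =====
-- def detect_time_signature(beats):
--     if not beats:
--         return 4, 4
--
--     counts = []
--     current = 0
--
--     for b in beats:
--         if b["beatNum"] == 1:
--             if current > 0:
--                 counts.append(current)
--             current = 1
--         else:
--             current += 1
--
--     if current > 0:
--         counts.append(current)
--
--     if not counts:
--         return 4, 4
--
--     beats_per_bar = max(set(counts), key=counts.count)
--
--     if beats_per_bar in (6, 9, 12):
--         return beats_per_bar, 8
--
--     return beats_per_bar, 4
-- ===== SOURCE B (Python) =====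
-- def detect_time_signature(beats):
--     if not beats:
--         return 4, 4
--
--     ones = [i for i, b in enumerate(beats) if b["beatNum"] == 1]
--
--     if not ones:
--         counts = [len(beats)]
--     else:
--         counts = ([ones[0]] if ones[0] > 0 else [])
--         counts += [j - i for i, j in zip(ones, ones[1:])]
--         counts.append(len(beats) - ones[-1])
--
--     beats_per_bar = max(set(counts), key=counts.count)
--
--     if beats_per_bar in (6, 9, 12):
--         return beats_per_bar, 8
--
--     return beats_per_bar, 4
-- ===== Notes on version B (the rewrite author's own statement) =====
-- stated objective: alternative
-- what changed: A's single pass with a running (counts, current) accumulator is replaced by a segment decomposition: B first collects the indices of all beats numbered 1 and reads the bar lengths off as the leading index, the gaps between consecutive indices, and the trailing remainder; the mode selection and the (6,9,12)->8 mapping are kept verbatim.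
-- outside the precondition, e.g. on detect_time_signature([{'beatNum': 1}, {'beatNum': 0}, {'beatNum': 1}]): A returns (1, 4), B returns (1, 4)
import Mathlib
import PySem

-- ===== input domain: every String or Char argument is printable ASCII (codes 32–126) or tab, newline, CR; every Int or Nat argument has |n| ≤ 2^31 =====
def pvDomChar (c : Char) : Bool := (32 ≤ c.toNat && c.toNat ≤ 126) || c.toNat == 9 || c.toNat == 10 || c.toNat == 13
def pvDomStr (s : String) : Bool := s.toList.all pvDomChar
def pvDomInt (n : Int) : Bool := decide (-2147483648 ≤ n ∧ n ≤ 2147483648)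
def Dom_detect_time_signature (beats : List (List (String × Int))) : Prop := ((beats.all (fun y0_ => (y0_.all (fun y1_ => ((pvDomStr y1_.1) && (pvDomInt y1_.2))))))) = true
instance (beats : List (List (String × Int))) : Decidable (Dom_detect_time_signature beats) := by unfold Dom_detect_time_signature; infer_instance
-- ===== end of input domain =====

-- B replaces A's running (counts, current) accumulator by a segment decomposition:
-- collect the indices of the beats numbered 1 and read the bar lengths off as gaps
-- between consecutive indices (same cost; objective: alternative decomposition).

-- ===== PORT A =====
def detect_time_signature (beats : List (List (String × Int))) : Int × Int :=
  if beats = [] then (4, 4)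
  else
    let st := beats.foldl
      (fun (acc : List Int × Int) b =>
        if (PySem.Dict.mk b).getD "beatNum" 0 == 1 then
          (if acc.2 > 0 then acc.1 ++ [acc.2] else acc.1, 1)
        else
          (acc.1, acc.2 + 1)) ([], 0)
    let counts := if st.2 > 0 then st.1 ++ [st.2] else st.1
    if counts = [] then (4, 4)
    else
      let beats_per_bar := (PySem.List.max? (PySem.Set.ofList counts) (fun x => counts.count x)).getD 0
      if beats_per_bar = 6 ∨ beats_per_bar = 9 ∨ beats_per_bar = 12 then (beats_per_bar, 8)
      else (beats_per_bar, 4)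

-- ===== PORT B =====
def detect_time_signature_alt (beats : List (List (String × Int))) : Int × Int :=
  if beats = [] then (4, 4)
  else
    let ones := (PySem.List.enumerate beats).filterMap
      (fun p => if (PySem.Dict.mk p.2).getD "beatNum" 0 == 1 then some p.1 else none)
    let counts :=
      match ones with
      | [] => [(beats.length : Int)]
      | o :: _ =>
          (if o > 0 then [o] else []) ++
          (ones.zip ones.tail).map (fun p => p.2 - p.1) ++
          [(beats.length : Int) - PySem.List.pyGetD ones (-1) 0]
    let beats_per_bar := (PySem.List.max? (PySem.Set.ofList counts) (fun x => counts.count x)).getD 0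
    if beats_per_bar = 6 ∨ beats_per_bar = 9 ∨ beats_per_bar = 12 then (beats_per_bar, 8)
    else (beats_per_bar, 4)

-- ===== PRECONDITION & SPEC =====
-- closed-form description of the bar lengths (used only by Pre_'s tie condition)
def pvSeg (flags : List Bool) (cur : Int) : List Int :=
  match flags with
  | [] => if cur > 0 then [cur] else []
  | f :: t => if f then (if cur > 0 then cur :: pvSeg t 1 else pvSeg t 1) else pvSeg t (cur + 1)

def pvCounts (beats : List (List (String × Int))) : List Int :=
  pvSeg (beats.map (fun b => (PySem.Dict.mk b).getD "beatNum" 0 == 1)) 0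

-- Pre_ excludes (a) beats lacking a "beatNum" key, where A raises KeyError; (b) beats
-- given with duplicate keys, where the assoc-list encoding of the dict is ambiguous
-- (Python keeps the last value for a repeated key, the convention here the first); and
-- (c) inputs whose bar-length mode is not unique, where A's pick among the tied
-- values is an accident of Python's set iteration order (not modelled).
def Pre_detect_time_signature (beats : List (List (String × Int))) : Prop :=
  (∀ b ∈ beats, ((PySem.Dict.mk b).get? "beatNum").isSome = true ∧ (b.map Prod.fst).Nodup) ∧
  (beats = [] ∨ ∃ m ∈ pvCounts beats, ∀ y ∈ pvCounts beats, y ≠ m →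
      (pvCounts beats).count y < (pvCounts beats).count m)

instance (beats : List (List (String × Int))) : Decidable (Pre_detect_time_signature beats) := by
  unfold Pre_detect_time_signature; infer_instance

def pvWitness_detect_time_signature : (List (List (String × Int))) :=
  [[("beatNum", 1)], [("beatNum", 2)], [("beatNum", 3)]]

def Spec_detect_time_signature (beats : List (List (String × Int))) (out : Int × Int) : Prop := out = detect_time_signature_alt beats
instance (beats : List (List (String × Int))) (out : Int × Int) : Decidable (Spec_detect_time_signature beats out) := by unfold Spec_detect_time_signature; infer_instance

-- ===== CLAIM (what is proved, stated in full; the proofs are below) =====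
def Claim_equal_detect_time_signature : Prop := ∀ (beats : List (List (String × Int))), Dom_detect_time_signature beats → Pre_detect_time_signature beats → Spec_detect_time_signature beats (detect_time_signature beats)

-- ===== LEMMAS AND PROOFS =====

def pvOnes (flags : List Bool) (i : Int) : List Int :=
  match flags with
  | [] => []
  | f :: t => if f then i :: pvOnes t (i + 1) else pvOnes t (i + 1)

def pvGaps (os : List Int) : List Int := (os.zip os.tail).map (fun p => p.2 - p.1)

theorem pvSeg_ne_nil (flags : List Bool) (cur : Int) (h0 : 0 ≤ cur) (h : 0 < cur ∨ flags ≠ []) :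
    pvSeg flags cur ≠ [] := by
  induction flags generalizing cur with
  | nil =>
    rcases h with h | h
    · simp [pvSeg, h]
    · simp at h
  | cons f t ih =>
    simp only [pvSeg]
    split
    · split
      · simp
      · exact ih 1 (by omega) (Or.inl (by omega))
    · exact ih (cur + 1) (by omega) (Or.inl (by omega))

theorem pvOnes_shift (flags : List Bool) (i : Int) :
    pvOnes flags i = (pvOnes flags 0).map (· + i) := by
  induction flags generalizing i with
  | nil => simp [pvOnes]
  | cons f t ih =>
    simp only [pvOnes]
    by_cases hf : f
    · simp only [hf, if_true, List.map_cons]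
      rw [ih (i + 1), ih (0 + 1), List.map_map]
      refine congrArg₂ List.cons (by omega) (List.map_congr_left fun a _ => ?_)
      simp only [Function.comp_apply]; omega
    · simp only [hf, Bool.false_eq_true, if_false]
      rw [ih (i + 1), ih (0 + 1), List.map_map]
      exact List.map_congr_left fun a _ => by simp only [Function.comp_apply]; omega

theorem pvGaps_shift (os : List Int) (i : Int) :
    pvGaps (os.map (· + i)) = pvGaps os := by
  induction os with
  | nil => simp [pvGaps]
  | cons a t ih =>
    cases t with
    | nil => simp [pvGaps]
    | cons b u =>
      simp only [pvGaps, List.map_cons, List.tail_cons, List.zip_cons_cons,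
        List.map_cons] at ih ⊢
      exact congrArg₂ List.cons (by omega) ih

theorem pvGetLast_map_add (os : List Int) (i d : Int) (h : os ≠ []) :
    (os.map (· + i)).getLastD d = os.getLastD d + i := by
  induction os with
  | nil => simp at h
  | cons a t ih =>
    cases t with
    | nil => simp
    | cons b u => simpa using ih (by simp)

theorem pvOnes_nonneg (flags : List Bool) (i : Int) (hi : 0 ≤ i) :
    ∀ o ∈ pvOnes flags i, 0 ≤ o := by
  induction flags generalizing i with
  | nil => simp [pvOnes]
  | cons f t ih =>
    simp only [pvOnes]
    by_cases hf : f
    · simp only [hf, if_true, List.mem_cons]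
      rintro o (rfl | ho)
      · exact hi
      · exact ih (i + 1) (by omega) o ho
    · simp only [hf, Bool.false_eq_true, if_false]
      exact fun o ho => ih (i + 1) (by omega) o ho

def pvB (os : List Int) (cur n : Int) : List Int :=
  match os with
  | [] => if cur + n > 0 then [cur + n] else []
  | o :: _ => (if cur + o > 0 then [cur + o] else []) ++ pvGaps os ++ [n - os.getLastD 0]

theorem pvSeg_eq_gaps (flags : List Bool) (cur : Int) (hc : 0 ≤ cur) :
    pvSeg flags cur = pvB (pvOnes flags 0) cur flags.length := by
  induction flags generalizing cur with
  | nil => simp [pvSeg, pvOnes, pvB]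
  | cons f t ih =>
    have hsh : pvOnes t (0 + 1) = (pvOnes t 0).map (· + 1) := pvOnes_shift t (0 + 1)
    by_cases hf : f
    · have iht := ih 1 (by omega)
      simp only [pvSeg, pvOnes, hf, if_true]
      rw [hsh]
      cases hos : pvOnes t 0 with
      | nil =>
        rw [hos] at iht
        simp only [List.map_nil, pvB]
        have h1 : pvSeg t 1 = [1 + (t.length : Int)] := by
          rw [iht, pvB]; simp only [if_pos (by omega : (1:Int) + (t.length:Int) > 0)]
        by_cases hcur : cur > 0
        · rw [if_pos hcur, h1]
          simp [hcur, pvGaps]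
          omega
        · rw [if_neg hcur, h1]
          simp [hcur, pvGaps]
          omega
      | cons o' rest =>
        rw [hos] at iht
        simp only [List.map_cons, pvB]
        have hlast : ((o' + 1) :: rest.map (· + 1)).getLastD 0 = (o' :: rest).getLastD 0 + 1 := by
          simpa using pvGetLast_map_add (o' :: rest) 1 0 (by simp)
        have hg : pvGaps (0 :: (o' + 1) :: rest.map (· + 1)) =
            (o' + 1) :: pvGaps (o' :: rest) := by
          have h2 : pvGaps ((o' + 1) :: rest.map (· + 1)) = pvGaps (o' :: rest) := by
            simpa using pvGaps_shift (o' :: rest) 1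
          simp only [pvGaps, List.tail_cons, List.zip_cons_cons, List.map_cons] at h2 ⊢
          exact congrArg₂ List.cons (by omega) h2
        have h1 : pvSeg t 1 = [1 + o'] ++ pvGaps (o' :: rest) ++
            [(t.length : Int) - (o' :: rest).getLastD 0] := by
          rw [iht, pvB]; simp only [if_pos (show (1:Int) + o' > 0 by have := pvOnes_nonneg t 0 le_rfl o' (by rw [hos]; simp); omega)]
        by_cases hcur : cur > 0
        · rw [if_pos hcur, h1]
          simp [hcur, hg]
          simp only [List.getLastD_eq_getLast?] at hlast
          omega
        · rw [if_neg hcur, h1]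
          simp [hcur, hg]
          simp only [List.getLastD_eq_getLast?] at hlast
          omega
    · have iht := ih (cur + 1) (by omega)
      simp only [pvSeg, pvOnes, hf, Bool.false_eq_true, if_false]
      rw [hsh]
      cases hos : pvOnes t 0 with
      | nil =>
        rw [hos] at iht
        simp only [List.map_nil, pvB] at iht ⊢
        rw [iht]
        simp only [List.length_cons]
        push_cast
        rw [show cur + 1 + (t.length : Int) = cur + ((t.length : Int) + 1) by ring]
      | cons o' rest =>
        rw [hos] at iht
        simp only [List.map_cons, pvB] at iht ⊢
        have hlast : ((o' + 1) :: rest.map (· + 1)).getLastD 0 = (o' :: rest).getLastD 0 + 1 := by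
          simpa using pvGetLast_map_add (o' :: rest) 1 0 (by simp)
        have hg : pvGaps ((o' + 1) :: rest.map (· + 1)) = pvGaps (o' :: rest) := by
          simpa using pvGaps_shift (o' :: rest) 1
        rw [iht]
        rw [hg, hlast]
        rw [show cur + 1 + o' = cur + (o' + 1) by ring]
        simp only [List.length_cons]
        congr 2
        push_cast
        ring

-- A's loop + finalize computes pvSeg
theorem pvA_counts (flags : List Bool) (cs : List Int) (cur : Int) :
    (let st := flags.foldl
        (fun (acc : List Int × Int) f =>
          if f then (if acc.2 > 0 then acc.1 ++ [acc.2] else acc.1, 1)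
          else (acc.1, acc.2 + 1)) (cs, cur)
     if st.2 > 0 then st.1 ++ [st.2] else st.1) = cs ++ pvSeg flags cur := by
  induction flags generalizing cs cur with
  | nil => simp only [List.foldl_nil, pvSeg]; split <;> simp
  | cons f t ih =>
    simp only [List.foldl_cons, pvSeg]
    by_cases hf : f
    · by_cases hc : cur > 0 <;> simp [hf, hc, ih, List.append_assoc]
    · simp [hf, ih]

-- B's ones comprehension computes pvOnes
theorem pvB_ones (beats : List (List (String × Int))) (s : Int) :
    (PySem.List.enumerate beats s).filterMap
      (fun p => if (PySem.Dict.mk p.2).getD "beatNum" 0 == 1 then some p.1 else none)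
      = pvOnes (beats.map (fun b => (PySem.Dict.mk b).getD "beatNum" 0 == 1)) s := by
  induction beats generalizing s with
  | nil => simp [PySem.List.enumerate_nil, pvOnes]
  | cons b t ih =>
    rw [PySem.List.enumerate_cons]
    simp only [List.filterMap_cons, List.map_cons, pvOnes]
    by_cases hb : (PySem.Dict.mk b).getD "beatNum" 0 = 1 <;>
      · have h := ih (s + 1)
        simp only [beq_iff_eq] at h
        simp [hb, h]

-- ===== VERDICT (by name: the statement is the Claim_ definition above) =====
theorem detect_time_signature_spec : Claim_equal_detect_time_signature := by
  intro beats _ _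
  unfold Spec_detect_time_signature detect_time_signature detect_time_signature_alt
  by_cases hb : beats = []
  · simp [hb]
  · rw [if_neg hb, if_neg hb]
    have hA := pvA_counts (beats.map (fun b => (PySem.Dict.mk b).getD "beatNum" 0 == 1)) [] 0
    rw [List.foldl_map] at hA
    simp only [List.nil_append] at hA
    have hOnes := pvB_ones beats 0
    have hSeg := pvSeg_eq_gaps (beats.map (fun b => (PySem.Dict.mk b).getD "beatNum" 0 == 1)) 0 le_rfl
    have hne : pvSeg (beats.map (fun b => (PySem.Dict.mk b).getD "beatNum" 0 == 1)) 0 ≠ [] :=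
      pvSeg_ne_nil _ 0 le_rfl (Or.inr (by simpa using hb))
    rw [hOnes]
    have hlen : ((beats.map (fun b => (PySem.Dict.mk b).getD "beatNum" 0 == 1)).length : Int)
        = (beats.length : Int) := by simp
    rw [hlen] at hSeg
    cases hos : pvOnes (beats.map (fun b => (PySem.Dict.mk b).getD "beatNum" 0 == 1)) 0 with
    | nil =>
      rw [hos] at hSeg
      have hpos : (0 : Int) + (beats.length : Int) > 0 := by
        cases beats with
        | nil => exact absurd rfl hb
        | cons x xs => simp
      have hc : pvSeg (beats.map (fun b => (PySem.Dict.mk b).getD "beatNum" 0 == 1)) 0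
          = [(beats.length : Int)] := by
        rw [hSeg]; simp only [pvB, zero_add]; rw [if_pos (by omega : ((beats.length : Int)) > 0)]
      rw [hc] at hA
      simp only [hA]
      rw [if_neg (by simp : ¬([(beats.length : Int)] = []))]
    | cons o rest =>
      rw [hos] at hSeg
      have ho : 0 ≤ o := pvOnes_nonneg _ 0 le_rfl o (by rw [hos]; simp)
      have hlast : (o :: rest).getLastD 0 = (o :: rest).getLast (by simp) := by
        simp [List.getLastD_eq_getLast?, List.getLast?_eq_some_getLast]
      have hc : pvSeg (beats.map (fun b => (PySem.Dict.mk b).getD "beatNum" 0 == 1)) 0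
          = (if o > 0 then [o] else []) ++
            ((o :: rest).zip (o :: rest).tail).map (fun p => p.2 - p.1) ++
            [(beats.length : Int) - PySem.List.pyGetD (o :: rest) (-1) 0] := by
        rw [hSeg]
        simp only [pvB, zero_add, pvGaps]
        rw [PySem.List.pyGetD_neg_one (o :: rest) 0 (by simp), hlast]
      rw [hc] at hA
      simp only [hA]
      rw [if_neg (by rw [← hc]; exact hne)]
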